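-- pv_equiv track=rewrite | github.com/ndayealain123/AlanScan-v4 | scanner/web/deserialization.py | _check_java_error
-- ===== SOURCE A (Python) =====
-- def _check_java_error(response: str) -> bool:
--     """Check for Java serialization error signatures."""
--     errors = [
--         "java.io",
--         "InvalidClassException",
--         "StreamCorruptedException",
--         "ClassNotFoundException",
--         "serialization"
--     ]
--     return any(e.lower() in response.lower() for e in errors)
-- ===== SOURCE B (Python) =====
-- # Single left-to-right scan with a first-character dispatch table: at each index,
-- # only the (lowered) signatures starting with that character are tested via
-- # startswith, instead of five independent full substring scans.
-- _STARTS = {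
--     "j": ("java.io",),
--     "i": ("invalidclassexception",),
--     "s": ("streamcorruptedexception", "serialization"),
--     "c": ("classnotfoundexception",),
-- }
--
--
-- def _check_java_error(response: str) -> bool:
--     """Check for Java serialization error signatures."""
--     text = response.lower()
--     for i in range(len(text)):
--         for p in _STARTS.get(text[i], ()):
--             if text.startswith(p, i):
--                 return True
--     return False
-- ===== Notes on version B (the rewrite author's own statement) =====
-- stated objective: alternative
-- what changed: Replaces five independent substring scans of the lowered response with one explicit left-to-right scan using a first-character dispatch table, testing only the signatures that can start at each position.
import Mathlib
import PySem

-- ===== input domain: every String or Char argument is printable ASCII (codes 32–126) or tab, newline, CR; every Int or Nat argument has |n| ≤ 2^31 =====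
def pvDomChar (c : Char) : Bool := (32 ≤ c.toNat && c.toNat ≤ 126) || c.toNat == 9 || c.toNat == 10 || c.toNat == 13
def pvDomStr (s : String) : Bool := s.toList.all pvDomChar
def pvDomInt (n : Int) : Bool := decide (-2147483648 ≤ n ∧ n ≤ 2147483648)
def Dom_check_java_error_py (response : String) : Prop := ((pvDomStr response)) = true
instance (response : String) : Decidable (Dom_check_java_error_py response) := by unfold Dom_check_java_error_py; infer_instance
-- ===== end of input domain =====

-- B replaces A's five independent substring scans by one explicit left-to-right scan
-- with a first-character dispatch table (objective: alternative); same return value.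

-- ===== PORT A =====
-- any(e.lower() in response.lower() for e in errors)
def check_java_error_py (response : String) : Bool :=
  let errors : List String :=
    ["java.io", "InvalidClassException", "StreamCorruptedException",
     "ClassNotFoundException", "serialization"]
  errors.any (fun e => PySem.Str.isIn (PySem.Str.lower e) (PySem.Str.lower response))

-- ===== PORT B =====
-- _STARTS.get(text[i], ()): the signatures that can start with character c.
def pvJavaErrStarts (c : Char) : List (List Char) :=
  if c = 'j' then ["java.io".toList]
  else if c = 'i' then ["invalidclassexception".toList]
  else if c = 's' then ["streamcorruptedexception".toList, "serialization".toList]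
  else if c = 'c' then ["classnotfoundexception".toList]
  else []

-- the for-loop over positions i with early return; text.startswith(p, i) is
-- "p is a prefix of the suffix of text starting at i".
def pvJavaErrScan : List Char → Bool
  | [] => false
  | c :: rest =>
      (pvJavaErrStarts c).any (fun p => p.isPrefixOf (c :: rest)) || pvJavaErrScan rest

def check_java_error_py_alt (response : String) : Bool :=
  pvJavaErrScan (PySem.Chars.lower response.toList)

-- ===== PRECONDITION & SPEC =====
def Spec_check_java_error_py (response : String) (out : Bool) : Prop := out = check_java_error_py_alt response
instance (response : String) (out : Bool) : Decidable (Spec_check_java_error_py response out) := by unfold Spec_check_java_error_py; infer_instance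

-- ===== CLAIM (what is proved, stated in full; the proofs are below) =====
def Claim_equal_check_java_error_py : Prop := ∀ (response : String), Dom_check_java_error_py response → Spec_check_java_error_py response (check_java_error_py response)

-- ===== LEMMAS AND PROOFS =====

def pvJavaErrPatterns : List (List Char) :=
  ["java.io".toList, "invalidclassexception".toList, "streamcorruptedexception".toList,
   "classnotfoundexception".toList, "serialization".toList]

-- The dispatch table only narrows the candidate set: at head character c, a pattern
-- is a prefix of c :: rest iff it is a dispatched pattern that is such a prefix.
theorem pvHeadEqOfPrefix {h c : Char} {tl rest : List Char}
    (hpre : (h :: tl).isPrefixOf (c :: rest) = true) : c = h := by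
  simp only [List.isPrefixOf, Bool.and_eq_true, beq_iff_eq] at hpre
  exact hpre.1.symm

theorem pvJavaErrStarts_any (c : Char) (rest : List Char) :
    ((pvJavaErrStarts c).any (fun p => p.isPrefixOf (c :: rest))
      = pvJavaErrPatterns.any (fun p => p.isPrefixOf (c :: rest))) := by
  rw [Bool.eq_iff_iff]
  simp only [List.any_eq_true]
  constructor
  · rintro ⟨p, hp, hpre⟩
    refine ⟨p, ?_, hpre⟩
    unfold pvJavaErrStarts at hp
    split_ifs at hp <;> simp_all [pvJavaErrPatterns] <;> tauto
  · rintro ⟨p, hp, hpre⟩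
    refine ⟨p, ?_, hpre⟩
    unfold pvJavaErrPatterns at hp
    simp only [List.mem_cons, List.not_mem_nil, or_false] at hp
    rcases hp with h | h | h | h | h
    · subst h
      rw [show ("java.io".toList) = 'j' :: "ava.io".toList from by decide] at hpre
      simp [pvJavaErrStarts, pvHeadEqOfPrefix hpre]
    · subst h
      rw [show ("invalidclassexception".toList) = 'i' :: "nvalidclassexception".toList from by decide] at hpre
      simp [pvJavaErrStarts, pvHeadEqOfPrefix hpre]
    · subst h
      rw [show ("streamcorruptedexception".toList) = 's' :: "treamcorruptedexception".toList from by decide] at hpre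
      simp [pvJavaErrStarts, pvHeadEqOfPrefix hpre]
    · subst h
      rw [show ("classnotfoundexception".toList) = 'c' :: "lassnotfoundexception".toList from by decide] at hpre
      simp [pvJavaErrStarts, pvHeadEqOfPrefix hpre]
    · subst h
      rw [show ("serialization".toList) = 's' :: "erialization".toList from by decide] at hpre
      simp [pvJavaErrStarts, pvHeadEqOfPrefix hpre]

-- B's scan finds exactly the inputs in which some pattern occurs as an infix.
theorem pvJavaErrScan_iff (l : List Char) :
    pvJavaErrScan l = true ↔ ∃ p ∈ pvJavaErrPatterns, p <:+: l := by
  induction l with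
  | nil =>
      simp only [pvJavaErrScan]
      constructor
      · intro h; exact absurd h (by decide)
      · rintro ⟨p, hp, hinf⟩
        have := List.infix_nil.mp hinf
        subst this
        exact absurd hp (by decide)
  | cons c rest ih =>
      simp only [pvJavaErrScan, Bool.or_eq_true, pvJavaErrStarts_any, List.any_eq_true, ih]
      constructor
      · rintro (⟨p, hp, hpre⟩ | ⟨p, hp, hinf⟩)
        · exact ⟨p, hp, (List.isPrefixOf_iff_prefix.mp hpre).isInfix⟩
        · exact ⟨p, hp, hinf.trans (List.suffix_cons c rest).isInfix⟩
      · rintro ⟨p, hp, hinf⟩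
        rcases List.infix_cons_iff.mp hinf with hpre | hinf'
        · exact Or.inl ⟨p, hp, List.isPrefixOf_iff_prefix.mpr hpre⟩
        · exact Or.inr ⟨p, hp, hinf'⟩

-- ===== VERDICT (by name: the statement is the Claim_ definition above) =====
theorem check_java_error_py_spec : Claim_equal_check_java_error_py := by
  intro response _
  unfold Spec_check_java_error_py check_java_error_py check_java_error_py_alt
  rw [Bool.eq_iff_iff]
  have h1 : PySem.Chars.lower "java.io".toList = "java.io".toList := by decide
  have h2 : PySem.Chars.lower "InvalidClassException".toList = "invalidclassexception".toList := by decide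
  have h3 : PySem.Chars.lower "StreamCorruptedException".toList = "streamcorruptedexception".toList := by decide
  have h4 : PySem.Chars.lower "ClassNotFoundException".toList = "classnotfoundexception".toList := by decide
  have h5 : PySem.Chars.lower "serialization".toList = "serialization".toList := by decide
  simp only [List.any_cons, List.any_nil, Bool.or_eq_true, Bool.false_eq_true, or_false,
    PySem.Str.isIn_eq, PySem.Str.toList_lower, PySem.Chars.isIn_iff_infix,
    pvJavaErrScan_iff, pvJavaErrPatterns, List.mem_cons, List.not_mem_nil,
    exists_eq_or_imp, exists_eq_left, h1, h2, h3, h4, h5]
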